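-- pv_equiv track=rewrite | github.com/JulianStiebler/demoparser | src/python/src/doc_gen.py | _to_safe_enum_name
-- ===== SOURCE A (Python) =====
-- def _to_safe_enum_name(name: str) -> str:
--     """Convert a string to a safe Python enum name."""
--     # Replace problematic characters
--     safe = name.replace(".", "_").replace("[", "_").replace("]", "_").replace(" ", "_").replace("+", "plus").replace("-", "_")
--     # Remove multiple underscores
--     while "__" in safe:
--         safe = safe.replace("__", "_")
--     # Remove leading/trailing underscores
--     safe = safe.strip("_")
--     # Ensure it starts with a letter
--     if safe and safe[0].isdigit():
--         safe = "N" + safe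
--     return safe or "UNKNOWN"
-- ===== SOURCE B (Python) =====
-- def _to_safe_enum_name(name: str) -> str:
--     """Convert a string to a safe Python enum name (single linear pass)."""
--     out = []
--     last_us = False  # last emitted character was '_'
--     for c in name:
--         if c == "+":
--             out.append("plus")
--             last_us = False
--         elif c in "._[] -":
--             if not last_us:
--                 out.append("_")
--                 last_us = True
--         else:
--             out.append(c)
--             last_us = False
--     safe = "".join(out).strip("_")
--     if safe and safe[0].isdigit():
--         safe = "N" + safe
--     return safe or "UNKNOWN"
-- ===== Notes on version B (the rewrite author's own statement) =====
-- stated objective: alternative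
-- what changed: A's six chained str.replace passes plus a fixpoint while-loop that repeatedly replaces double underscores are replaced by one linear pass that maps each character and collapses underscore runs on the fly via a flag remembering whether the previously emitted character was an underscore.
import Mathlib
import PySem

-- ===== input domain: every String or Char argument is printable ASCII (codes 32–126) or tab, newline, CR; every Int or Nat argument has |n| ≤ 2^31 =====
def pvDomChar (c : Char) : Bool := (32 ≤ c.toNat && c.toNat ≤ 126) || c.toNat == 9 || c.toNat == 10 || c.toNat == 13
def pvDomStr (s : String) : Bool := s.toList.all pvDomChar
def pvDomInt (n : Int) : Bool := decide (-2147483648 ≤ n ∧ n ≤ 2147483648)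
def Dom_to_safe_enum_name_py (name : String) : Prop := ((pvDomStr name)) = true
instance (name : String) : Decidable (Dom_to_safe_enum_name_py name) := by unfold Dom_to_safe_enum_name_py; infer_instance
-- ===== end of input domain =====

-- B replaces A's chained str.replace passes and its '__'-collapsing while-loop by ONE linear pass
-- with a "last emitted char was '_'" flag; same return value, no speed claim (alternative).

-- ===== PORT A =====
-- One application of safe.replace("__", "_") written as direct structural recursion; it is needed
-- (with the three lemmas below) only to justify termination of A's while-loop, and is proved equal
-- to PySem's replace in pvReplace_eq_collapse2.
def pvCollapse2 : List Char → List Char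
  | [] => []
  | [c] => [c]
  | c1 :: c2 :: t =>
    if c1 = '_' ∧ c2 = '_' then '_' :: pvCollapse2 t else c1 :: pvCollapse2 (c2 :: t)
termination_by l => l.length

theorem pvReplaceGo_pair (fuel : Nat) : ∀ (l acc : List Char), l.length ≤ fuel →
    PySem.Chars.replace.go ['_', '_'] ['_'] fuel l acc = acc.reverse ++ pvCollapse2 l := by
  induction fuel with
  | zero =>
    intro l acc h
    have : l = [] := List.eq_nil_of_length_eq_zero (Nat.le_zero.mp h)
    subst this
    simp [PySem.Chars.replace.go, pvCollapse2]
  | succ n ih =>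
    intro l acc h
    match l with
    | [] => simp [PySem.Chars.replace.go, pvCollapse2]
    | [c] =>
      rw [PySem.Chars.replace.go]
      have : List.isPrefixOf ['_', '_'] [c] = false := by simp [List.isPrefixOf]
      rw [this]
      simp only [if_neg (by simp : ¬ (false = true))]
      rw [ih [] (c :: acc) (by simp)]
      simp [pvCollapse2]
    | c :: d :: t =>
      rw [PySem.Chars.replace.go]
      by_cases hp : c = '_' ∧ d = '_'
      · obtain ⟨hc, hd⟩ := hp; subst hc; subst hd
        have : List.isPrefixOf ['_', '_'] ('_' :: '_' :: t) = true := by simp [List.isPrefixOf]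
        rw [this]
        rw [show (['_', '_'] : List Char).length = 2 from rfl]
        rw [show List.drop 2 ('_' :: '_' :: t) = t from rfl]
        rw [ih t _ (by simp at h ⊢; omega)]
        simp [pvCollapse2]
      · have : List.isPrefixOf ['_', '_'] (c :: d :: t) = false := by
          simp [List.isPrefixOf]
          intro h1 h2; exact hp ⟨h1.symm, h2.symm⟩
        rw [this]
        simp only [if_neg (by simp : ¬ (false = true))]
        rw [ih (d :: t) (c :: acc) (by simp at h ⊢; omega)]
        simp [pvCollapse2, hp]

theorem pvReplace_eq_collapse2 (l : List Char) :
    PySem.Chars.replace l ['_', '_'] ['_'] = pvCollapse2 l := by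
  rw [PySem.Chars.replace]
  simp only [List.isEmpty]
  rw [pvReplaceGo_pair l.length l [] (le_refl _)]
  simp

theorem pvCollapse2_length_le (l : List Char) : (pvCollapse2 l).length ≤ l.length := by
  induction l using pvCollapse2.induct with
  | case1 => simp [pvCollapse2]
  | case2 c => simp [pvCollapse2]
  | case3 c1 c2 t h ih => simp [pvCollapse2, h]; omega
  | case4 c1 c2 t h ih => simp [pvCollapse2, h]; simp at ih; omega

theorem pvCollapse2_length_lt (l : List Char) (h : ['_', '_'] <:+: l) :
    (pvCollapse2 l).length < l.length := by
  induction l using pvCollapse2.induct with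
  | case1 => simp at h
  | case2 c =>
    exfalso
    have := h.length_le; simp at this
  | case3 c1 c2 t hp ih =>
    have := pvCollapse2_length_le t
    simp [pvCollapse2, hp]; omega
  | case4 c1 c2 t hp ih =>
    have hinf : ['_', '_'] <:+: c2 :: t := by
      rcases (List.infix_cons_iff).mp h with hpre | hinf
      · exfalso
        rcases hpre with ⟨r, hr⟩
        simp at hr
        exact hp ⟨hr.1.symm, hr.2.1.symm⟩
      · exact hinf
    have := ih hinf
    simp [pvCollapse2, hp]; simp at this; omega

-- A's `while "__" in safe: safe = safe.replace("__", "_")`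
def pvWhileCollapse (safe : String) : String :=
  if PySem.Str.isIn "__" safe then
    pvWhileCollapse (PySem.Str.replace safe "__" "_")
  else safe
termination_by safe.toList.length
decreasing_by
  rename_i h
  have hinf : (['_', '_'] : List Char) <:+: safe.toList := by
    have := (PySem.Str.isIn_iff_infix "__" safe).mp h
    simpa using this
  have ht : (PySem.Str.replace safe "__" "_").toList
      = PySem.Chars.replace safe.toList ['_', '_'] ['_'] := by
    simp [PySem.Str.toList_replace]
  rw [ht, pvReplace_eq_collapse2]
  exact pvCollapse2_length_lt _ hinf

def to_safe_enum_name_py (name : String) : String :=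
  -- safe = name.replace(".","_").replace("[","_").replace("]","_").replace(" ","_").replace("+","plus").replace("-","_")
  let safe := PySem.Str.replace (PySem.Str.replace (PySem.Str.replace (PySem.Str.replace
      (PySem.Str.replace (PySem.Str.replace name "." "_") "[" "_") "]" "_") " " "_") "+" "plus") "-" "_"
  -- while "__" in safe: safe = safe.replace("__","_")
  let safe := pvWhileCollapse safe
  -- safe = safe.strip("_")
  let safe := PySem.Str.stripChars safe "_"
  -- if safe and safe[0].isdigit(): safe = "N" + safe
  let safe :=
    if safe.toList ≠ [] ∧ (match PySem.Str.pyGet? safe 0 with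
                            | some c => PySem.Chars.isdigit c
                            | none => false) = true
    then "N" ++ safe else safe
  -- return safe or "UNKNOWN"
  if safe.toList = [] then "UNKNOWN" else safe

-- ===== PORT B =====
-- one step of B's loop: state = (emitted chars, last emitted char was '_')
def pvBStep : List Char × Bool → Char → List Char × Bool
  | (out, lastUs), c =>
    if c = '+' then (out ++ "plus".toList, false)
    else if c ∈ ['.', '_', '[', ']', ' ', '-'] then
      (if lastUs then (out, true) else (out ++ ['_'], true))
    else (out ++ [c], false)

def to_safe_enum_name_py_alt (name : String) : String :=
  let st := name.toList.foldl pvBStep ([], false)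
  let safe := PySem.Chars.stripChars st.1 ['_']
  let safe := match safe with
    | c :: t => if PySem.Chars.isdigit c then 'N' :: c :: t else c :: t
    | [] => []
  if safe = [] then "UNKNOWN" else String.ofList safe

-- ===== PRECONDITION & SPEC =====
def Spec_to_safe_enum_name_py (name : String) (out : String) : Prop := out = to_safe_enum_name_py_alt name
instance (name : String) (out : String) : Decidable (Spec_to_safe_enum_name_py name out) := by unfold Spec_to_safe_enum_name_py; infer_instance

-- ===== CLAIM (what is proved, stated in full; the proofs are below) =====
def Claim_equal_to_safe_enum_name_py : Prop := ∀ (name : String), Dom_to_safe_enum_name_py name → Spec_to_safe_enum_name_py name (to_safe_enum_name_py name)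

-- ===== LEMMAS AND PROOFS =====

-- per-char substitution performed by A's six chained replaces
def pvCharSub (c : Char) : List Char :=
  if c = '.' ∨ c = '[' ∨ c = ']' ∨ c = ' ' ∨ c = '-' then ['_']
  else if c = '+' then ['p', 'l', 'u', 's']
  else [c]

theorem pvReplaceGo_single (o : Char) (new : List Char) (fuel : Nat) :
    ∀ (l acc : List Char), l.length ≤ fuel →
    PySem.Chars.replace.go [o] new fuel l acc
      = acc.reverse ++ l.flatMap (fun c => if c = o then new else [c]) := by
  induction fuel with
  | zero =>
    intro l acc h
    have : l = [] := List.eq_nil_of_length_eq_zero (Nat.le_zero.mp h)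
    subst this
    simp [PySem.Chars.replace.go]
  | succ n ih =>
    intro l acc h
    match l with
    | [] => simp [PySem.Chars.replace.go]
    | c :: t =>
      rw [PySem.Chars.replace.go]
      by_cases hc : c = o
      · subst hc
        have : List.isPrefixOf [c] (c :: t) = true := by simp [List.isPrefixOf]
        rw [this]
        simp only [if_true]
        rw [show ([c] : List Char).length = 1 from rfl, show List.drop 1 (c :: t) = t from rfl]
        rw [ih t _ (by simp at h ⊢; omega)]
        simp
      · have : List.isPrefixOf [o] (c :: t) = false := by
          simp [List.isPrefixOf]; exact fun h' => hc h'.symm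
        rw [this]
        simp only [if_neg (by simp : ¬ (false = true))]
        rw [ih t (c :: acc) (by simp at h ⊢; omega)]
        simp [hc]

theorem pvReplace_single (o : Char) (new : List Char) (l : List Char) :
    PySem.Chars.replace l [o] new = l.flatMap (fun c => if c = o then new else [c]) := by
  rw [PySem.Chars.replace]
  simp only [List.isEmpty]
  rw [pvReplaceGo_single o new l.length l [] (le_refl _)]
  simp

theorem pvStageOne (l : List Char) :
    PySem.Chars.replace (PySem.Chars.replace (PySem.Chars.replace (PySem.Chars.replace
      (PySem.Chars.replace (PySem.Chars.replace l ['.'] ['_']) ['['] ['_']) [']'] ['_'])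
      [' '] ['_']) ['+'] ['p', 'l', 'u', 's']) ['-'] ['_'] = l.flatMap pvCharSub := by
  simp only [pvReplace_single, List.flatMap_assoc]
  apply List.flatMap_congr
  intro c _
  by_cases h1 : c = '.' <;> by_cases h2 : c = '[' <;> by_cases h3 : c = ']' <;>
    by_cases h4 : c = ' ' <;> by_cases h5 : c = '-' <;> by_cases h6 : c = '+' <;>
    simp_all [pvCharSub]

-- squeeze: collapse every run of '_' to a single '_' (the fixpoint A's while-loop reaches)
def pvSqueeze : List Char → List Char
  | [] => []
  | [c] => [c]
  | c1 :: c2 :: t =>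
    if c1 = '_' ∧ c2 = '_' then pvSqueeze (c2 :: t) else c1 :: pvSqueeze (c2 :: t)
termination_by l => l.length

theorem pvCollapse2_pair (t : List Char) :
    pvCollapse2 ('_' :: '_' :: t) = '_' :: pvCollapse2 t := by simp [pvCollapse2]

theorem pvCollapse2_nopair (c1 c2 : Char) (t : List Char) (h : ¬ (c1 = '_' ∧ c2 = '_')) :
    pvCollapse2 (c1 :: c2 :: t) = c1 :: pvCollapse2 (c2 :: t) := by simp [pvCollapse2, h]

theorem pvSqueeze_pair (t : List Char) :
    pvSqueeze ('_' :: '_' :: t) = pvSqueeze ('_' :: t) := by simp [pvSqueeze]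

theorem pvSqueeze_nopair (c1 c2 : Char) (t : List Char) (h : ¬ (c1 = '_' ∧ c2 = '_')) :
    pvSqueeze (c1 :: c2 :: t) = c1 :: pvSqueeze (c2 :: t) := by simp [pvSqueeze, h]

theorem pvSqueeze_of_no_pair (l : List Char) (h : ¬ ['_', '_'] <:+: l) : pvSqueeze l = l := by
  induction l using pvSqueeze.induct with
  | case1 => simp [pvSqueeze]
  | case2 c => simp [pvSqueeze]
  | case3 c1 c2 t hp ih =>
    exfalso; apply h
    obtain ⟨h1, h2⟩ := hp; subst h1; subst h2
    exact List.IsPrefix.isInfix ⟨t, rfl⟩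
  | case4 c1 c2 t hp ih =>
    have hni : ¬ ['_', '_'] <:+: c2 :: t := by
      intro hinf; exact h (hinf.trans (List.suffix_cons c1 (c2 :: t)).isInfix)
    rw [pvSqueeze_nopair c1 c2 t hp, ih hni]

theorem pvSqueeze_collapse2_cons (c : Char) (t : List Char) :
    pvSqueeze (c :: pvCollapse2 t) = pvSqueeze (c :: t) := by
  induction t using pvCollapse2.induct generalizing c with
  | case1 => simp [pvCollapse2]
  | case2 d => simp [pvCollapse2]
  | case3 c1 c2 t hp ih =>
    obtain ⟨h1, h2⟩ := hp; subst h1; subst h2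
    rw [pvCollapse2_pair]
    by_cases hc : c = '_'
    · subst hc
      rw [pvSqueeze_pair, ih '_', pvSqueeze_pair, pvSqueeze_pair]
    · rw [pvSqueeze_nopair c '_' _ (by simp [hc]), ih '_',
          pvSqueeze_nopair c '_' _ (by simp [hc]), pvSqueeze_pair]
  | case4 c1 c2 t hp ih =>
    rw [pvCollapse2_nopair c1 c2 t hp]
    by_cases hc : c = '_' ∧ c1 = '_'
    · obtain ⟨h1, h2⟩ := hc; subst h1; subst h2
      rw [pvSqueeze_pair, ih '_', pvSqueeze_pair]
    · rw [pvSqueeze_nopair c c1 _ hc, ih c1, pvSqueeze_nopair c c1 _ hc]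

theorem pvSqueeze_collapse2 (l : List Char) : pvSqueeze (pvCollapse2 l) = pvSqueeze l := by
  match l with
  | [] => simp [pvCollapse2]
  | [c] => simp [pvCollapse2]
  | c1 :: c2 :: t =>
    by_cases hp : c1 = '_' ∧ c2 = '_'
    · obtain ⟨h1, h2⟩ := hp; subst h1; subst h2
      rw [pvCollapse2_pair, pvSqueeze_collapse2_cons, pvSqueeze_pair]
    · rw [pvCollapse2_nopair c1 c2 t hp, pvSqueeze_collapse2_cons]

theorem pvWhileCollapse_toList (s : String) :
    (pvWhileCollapse s).toList = pvSqueeze s.toList := by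
  induction s using pvWhileCollapse.induct with
  | case1 s h ih =>
    rw [pvWhileCollapse, if_pos h]
    rw [ih]
    have ht : (PySem.Str.replace s "__" "_").toList
        = pvCollapse2 s.toList := by
      simp [PySem.Str.toList_replace, pvReplace_eq_collapse2]
    rw [ht, pvSqueeze_collapse2]
  | case2 s h =>
    rw [pvWhileCollapse, if_neg h]
    have hf : PySem.Chars.isIn ['_', '_'] s.toList = false := by
      have hh := eq_false_of_ne_true h
      simpa using hh
    rw [pvSqueeze_of_no_pair _ ((PySem.Chars.isIn_eq_false_iff _ _).mp hf)]

-- flag-indexed squeeze: what B's loop emits when the flag is b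
def pvSqF (b : Bool) : List Char → List Char
  | [] => []
  | c :: t =>
    if c = '_' then (if b then pvSqF true t else '_' :: pvSqF true t)
    else c :: pvSqF false t

theorem pvSqueeze_cons (c : Char) (l : List Char) :
    pvSqueeze (c :: l) = c :: pvSqF (decide (c = '_')) l := by
  induction l generalizing c with
  | nil => by_cases hc : c = '_' <;> simp [pvSqueeze, pvSqF, hc]
  | cons d u ih =>
    by_cases hc : c = '_' <;> by_cases hd : d = '_'
    · subst hc; subst hd
      rw [pvSqueeze_pair, ih '_']; simp [pvSqF]
    · subst hc
      rw [pvSqueeze_nopair _ _ _ (by simp [hd]), ih d]; simp [pvSqF, hd]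
    · subst hd
      rw [pvSqueeze_nopair _ _ _ (by simp [hc]), ih '_']; simp [pvSqF, hc]
    · rw [pvSqueeze_nopair _ _ _ (by simp [hc]), ih d]; simp [pvSqF, hd]

theorem pvSqueeze_eq_sqF (l : List Char) : pvSqueeze l = pvSqF false l := by
  match l with
  | [] => simp [pvSqueeze, pvSqF]
  | c :: t =>
    rw [pvSqueeze_cons]
    by_cases hc : c = '_' <;> simp [pvSqF, hc]

theorem pvFoldl_bstep (s : List Char) : ∀ (acc : List Char) (b : Bool),
    (s.foldl pvBStep (acc, b)).1 = acc ++ pvSqF b (s.flatMap pvCharSub) := by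
  induction s with
  | nil => intro acc b; simp [pvSqF]
  | cons c t ih =>
    intro acc b
    by_cases hplus : c = '+'
    · subst hplus
      rw [List.foldl_cons, show pvBStep (acc, b) '+' = (acc ++ "plus".toList, false) from rfl]
      rw [ih]
      simp [pvCharSub, pvSqF]
    · by_cases hsep : c ∈ ['.', '_', '[', ']', ' ', '-']
      · have hsub : pvCharSub c = ['_'] := by
          fin_cases hsep <;> simp [pvCharSub]
        rw [List.foldl_cons]
        have hstep : pvBStep (acc, b) c = (if b then (acc, true) else (acc ++ ['_'], true)) := by
          show (if c = '+' then _ else if c ∈ ['.', '_', '[', ']', ' ', '-'] then _ else _) = _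
          rw [if_neg hplus, if_pos hsep]
        rw [hstep]
        cases b
        · rw [if_neg (by decide), ih]
          simp [hsub, pvSqF]
        · rw [if_pos rfl, ih]
          simp [hsub, pvSqF]
      · have hsep' : c ≠ '.' ∧ c ≠ '_' ∧ c ≠ '[' ∧ c ≠ ']' ∧ c ≠ ' ' ∧ c ≠ '-' := by
          simp only [List.mem_cons] at hsep
          push Not at hsep
          exact ⟨hsep.1, hsep.2.1, hsep.2.2.1, hsep.2.2.2.1, hsep.2.2.2.2.1, hsep.2.2.2.2.2.1⟩
        obtain ⟨n1, n2, n3, n4, n5, n6⟩ := hsep'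
        have hsub : pvCharSub c = [c] := by
          simp [pvCharSub, n1, n3, n4, n5, n6, hplus]
        rw [List.foldl_cons]
        have hstep : pvBStep (acc, b) c = (acc ++ [c], false) := by
          show (if c = '+' then _ else if c ∈ ['.', '_', '[', ']', ' ', '-'] then _ else _) = _
          rw [if_neg hplus, if_neg hsep]
        rw [hstep, ih]
        simp [hsub, pvSqF, n2]

-- final (strip / digit / UNKNOWN) stage of both ports, applied to the same char list
theorem pvFinalStage (L : List Char) :
    (let safe := String.ofList L;
     let safe :=
       if safe.toList ≠ [] ∧ (match PySem.Str.pyGet? safe 0 with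
                               | some c => PySem.Chars.isdigit c
                               | none => false) = true
       then "N" ++ safe else safe;
     if safe.toList = [] then "UNKNOWN" else safe)
    = (let safe := match L with
         | c :: t => if PySem.Chars.isdigit c then 'N' :: c :: t else c :: t
         | [] => ([] : List Char);
       if safe = [] then "UNKNOWN" else String.ofList safe) := by
  match L with
  | [] => simp
  | c :: t =>
    have hget : PySem.Str.pyGet? (String.ofList (c :: t)) 0 = some c := by
      simp [PySem.List.pyGet?, PySem.List.pyIdx?]
    by_cases hd : PySem.Chars.isdigit c = true
    · simp only [hget, hd, String.toList_ofList, ne_eq, reduceCtorEq, not_false_iff, true_and,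
        if_pos]
      rw [if_neg (by simp), if_neg (by simp)]
      apply String.toList_inj.mp
      simp
    · simp only [hget, hd, String.toList_ofList, ne_eq, reduceCtorEq, not_false_iff,
        and_false, if_false]

-- ===== VERDICT (by name: the statement is the Claim_ definition above) =====
theorem to_safe_enum_name_py_spec : Claim_equal_to_safe_enum_name_py := by
  intro name _
  show to_safe_enum_name_py name = to_safe_enum_name_py_alt name
  simp only [to_safe_enum_name_py, to_safe_enum_name_py_alt]
  have hchain : (PySem.Str.replace (PySem.Str.replace (PySem.Str.replace (PySem.Str.replace
      (PySem.Str.replace (PySem.Str.replace name "." "_") "[" "_") "]" "_") " " "_") "+" "plus") "-" "_").toList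
      = name.toList.flatMap pvCharSub := by
    simp only [PySem.Str.toList_replace]
    have h1 : ("." : String).toList = ['.'] := by decide
    have h2 : ("[" : String).toList = ['['] := by decide
    have h3 : ("]" : String).toList = [']'] := by decide
    have h4 : (" " : String).toList = [' '] := by decide
    have h5 : ("+" : String).toList = ['+'] := by decide
    have h6 : ("-" : String).toList = ['-'] := by decide
    have h7 : ("_" : String).toList = ['_'] := by decide
    have h8 : ("plus" : String).toList = ['p', 'l', 'u', 's'] := by decide
    rw [h1, h2, h3, h4, h5, h6, h7, h8]
    exact pvStageOne name.toList
  have hW : (pvWhileCollapse (PySem.Str.replace (PySem.Str.replace (PySem.Str.replace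
      (PySem.Str.replace (PySem.Str.replace (PySem.Str.replace name "." "_") "[" "_")
      "]" "_") " " "_") "+" "plus") "-" "_")).toList
      = pvSqueeze (name.toList.flatMap pvCharSub) := by
    rw [pvWhileCollapse_toList, hchain]
  have hB : (name.toList.foldl pvBStep ([], false)).1
      = pvSqueeze (name.toList.flatMap pvCharSub) := by
    rw [pvFoldl_bstep, pvSqueeze_eq_sqF]; simp
  have hstrip : PySem.Str.stripChars (pvWhileCollapse (PySem.Str.replace (PySem.Str.replace
      (PySem.Str.replace (PySem.Str.replace (PySem.Str.replace (PySem.Str.replace name "." "_")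
      "[" "_") "]" "_") " " "_") "+" "plus") "-" "_")) "_"
      = String.ofList (PySem.Chars.stripChars (pvSqueeze (name.toList.flatMap pvCharSub)) ['_']) := by
    rw [PySem.Str.stripChars, hW]
    have h7 : ("_" : String).toList = ['_'] := by decide
    rw [h7]
  rw [hstrip, hB]
  exact pvFinalStage (PySem.Chars.stripChars (pvSqueeze (name.toList.flatMap pvCharSub)) ['_'])
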